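-- pv_equiv track=rewrite | github.com/Fede-33/Python | Aprendeconalf/04-Trabajos/Airbnb/parte1.py | anfitriones
-- ===== SOURCE A (Python) =====
-- def anfitriones(lista):
--     diccionario = {}
--     for i in lista:
--         try:
--             diccionario[i['host_id']] += 1
--         except:
--             diccionario[i['host_id']] = 1
--     return diccionario
-- ===== SOURCE B (Python) =====
-- def anfitriones(lista):
--     ids = [i['host_id'] for i in lista]
--     return {h: ids.count(h) for h in dict.fromkeys(ids)}
-- ===== Notes on version B (the rewrite author's own statement) =====
-- stated objective: alternative
-- what changed: B replaces A's single try/except accumulate pass over a counter dict with an index-then-count scheme: extract all host_ids, deduplicate preserving first appearance, then count each distinct id by scanning the id list.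
import Mathlib
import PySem

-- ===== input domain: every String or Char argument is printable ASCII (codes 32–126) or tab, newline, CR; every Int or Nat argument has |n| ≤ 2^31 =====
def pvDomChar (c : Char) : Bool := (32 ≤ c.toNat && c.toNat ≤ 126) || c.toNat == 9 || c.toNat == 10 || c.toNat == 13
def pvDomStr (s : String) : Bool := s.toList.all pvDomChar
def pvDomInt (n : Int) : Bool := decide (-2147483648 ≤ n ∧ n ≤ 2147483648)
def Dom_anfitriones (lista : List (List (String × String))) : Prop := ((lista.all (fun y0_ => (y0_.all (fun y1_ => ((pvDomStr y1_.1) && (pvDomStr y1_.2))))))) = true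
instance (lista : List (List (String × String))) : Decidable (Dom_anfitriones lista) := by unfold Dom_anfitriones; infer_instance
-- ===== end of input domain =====

-- B builds the id list, deduplicates it, and counts each distinct id by rescanning, instead of A's single try/except accumulate pass (alternative decomposition, same result).
-- ===== PORT A =====
-- one loop iteration of A: try d[i['host_id']] += 1 except: d[i['host_id']] = 1
-- (a row missing 'host_id' makes both lookups raise KeyError — excluded by Pre_; the port leaves d unchanged there)
def anfitrionesStep (d : PySem.Dict String Int) (i : List (String × String)) : PySem.Dict String Int :=
  match (PySem.Dict.mk i).get? "host_id" with
  | none => d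
  | some h =>
    match d.get? h with
    | some v => d.insert h (v + 1)   -- the try branch: existing key, += keeps position
    | none => d.insert h 1           -- the except branch: new key appended with value 1

def anfitriones (lista : List (List (String × String))) : List (String × Int) :=
  (lista.foldl anfitrionesStep PySem.Dict.empty).items

-- ===== PORT B =====
-- ids = [i['host_id'] for i in lista]  (under Pre_ every lookup succeeds; getD "" is never the taken branch there)
def anfitrionesIds (lista : List (List (String × String))) : List String :=
  lista.map (fun i => (((PySem.Dict.mk i).get? "host_id").getD ""))

def anfitriones_alt (lista : List (List (String × String))) : List (String × Int) :=
  let ids := anfitrionesIds lista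
  (PySem.List.dedup ids).map (fun h => (h, (PySem.List.count ids h : Int)))

-- ===== PRECONDITION & SPEC =====
-- Pre_ excludes exactly the rows without a 'host_id' key, on which A (and B) raise KeyError.
def Pre_anfitriones (lista : List (List (String × String))) : Prop :=
  ∀ i ∈ lista, (PySem.Dict.mk i).contains "host_id" = true
instance (lista : List (List (String × String))) : Decidable (Pre_anfitriones lista) := by unfold Pre_anfitriones; infer_instance

def pvWitness_anfitriones : (List (List (String × String))) :=
  [[("host_id", "7"), ("name", "x")], [("host_id", "9")], [("host_id", "7")]]

def Spec_anfitriones (lista : List (List (String × String))) (out : List (String × Int)) : Prop := out = anfitriones_alt lista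
instance (lista : List (List (String × String))) (out : List (String × Int)) : Decidable (Spec_anfitriones lista out) := by unfold Spec_anfitriones; infer_instance

-- ===== CLAIM (what is proved, stated in full; the proofs are below) =====
def Claim_equal_anfitriones : Prop := ∀ (lista : List (List (String × String))), Dom_anfitriones lista → Pre_anfitriones lista → Spec_anfitriones lista (anfitriones lista)

-- ===== LEMMAS AND PROOFS =====

-- Under Pre_, A's step is the standard counter insert on the extracted id.
theorem anfitrionesStep_eq (d : PySem.Dict String Int) (i : List (String × String))
    (h : (PySem.Dict.mk i).contains "host_id" = true) :
    anfitrionesStep d i = d.insert (((PySem.Dict.mk i).get? "host_id").getD "") (d.getD (((PySem.Dict.mk i).get? "host_id").getD "") 0 + 1) := by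
  unfold anfitrionesStep
  rw [PySem.Dict.contains_eq_isSome_get?] at h
  cases hg : (PySem.Dict.mk i).get? "host_id" with
  | none => simp [hg] at h
  | some x =>
    simp only [Option.getD_some]
    cases hd : d.get? x with
    | none => simp [PySem.Dict.getD_eq_get?_getD, hd]
    | some v => simp [PySem.Dict.getD_eq_get?_getD, hd]

-- A's fold over rows equals the counter-building fold over the extracted ids.
theorem anfitriones_fold_eq (lista : List (List (String × String))) (d : PySem.Dict String Int)
    (hpre : ∀ i ∈ lista, (PySem.Dict.mk i).contains "host_id" = true) :
    lista.foldl anfitrionesStep d =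
      (anfitrionesIds lista).foldl (fun d x => d.insert x (d.getD x 0 + 1)) d := by
  induction lista generalizing d with
  | nil => rfl
  | cons i rest ih =>
    simp only [anfitrionesIds, List.map_cons, List.foldl_cons]
    rw [anfitrionesStep_eq d i (hpre i (by simp))]
    exact ih _ (fun j hj => hpre j (by simp [hj]))

-- ===== VERDICT (by name: the statement is the Claim_ definition above) =====
theorem anfitriones_spec : Claim_equal_anfitriones := by
  intro lista _ hpre
  unfold Spec_anfitriones anfitriones anfitriones_alt
  rw [anfitriones_fold_eq lista PySem.Dict.empty hpre,
      PySem.Dict.foldl_insert_getD_add_one_eq_counter, PySem.Dict.items_counter]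
  simp [PySem.List.count_eq]
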